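-- pv_equiv track=rewrite | github.com/google-research/language | language/xsp/evaluation/official_evaluation.py | find_used_entities_in_string
-- ===== SOURCE A (Python) =====
-- def find_used_entities_in_string(query, columns, tables):
--   """Heuristically finds schema entities included in a SQL query."""
--   used_columns = set()
--   used_tables = set()
--
--   nopunct_query = query.replace('.', ' ').replace('(', ' ').replace(')', ' ')
--
--   for token in nopunct_query.split(' '):
--     if token.lower() in columns:
--       used_columns.add(token.lower())
--     if token.lower() in tables:
--       used_tables.add(token.lower())
--   return used_columns, used_tables
-- ===== SOURCE B (Python) =====
-- def find_used_entities_in_string(query, columns, tables):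
--   """Heuristically finds schema entities included in a SQL query."""
--   used_columns = set()
--   used_tables = set()
--
--   cur = []
--
--   def flush():
--     token = ''.join(cur).lower()
--     if token in columns:
--       used_columns.add(token)
--     if token in tables:
--       used_tables.add(token)
--     cur.clear()
--
--   for ch in query:
--     if ch in ' .()':
--       flush()
--     else:
--       cur.append(ch)
--   flush()
--   return used_columns, used_tables
-- ===== Notes on version B (the rewrite author's own statement) =====
-- stated objective: alternative
-- what changed: B replaces A's three full-string punctuation replaces, a split pass and a token loop by a single streaming character scanner that accumulates the current token and flushes it at each delimiter, never materialising the rewritten string or the token list.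
import Mathlib
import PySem

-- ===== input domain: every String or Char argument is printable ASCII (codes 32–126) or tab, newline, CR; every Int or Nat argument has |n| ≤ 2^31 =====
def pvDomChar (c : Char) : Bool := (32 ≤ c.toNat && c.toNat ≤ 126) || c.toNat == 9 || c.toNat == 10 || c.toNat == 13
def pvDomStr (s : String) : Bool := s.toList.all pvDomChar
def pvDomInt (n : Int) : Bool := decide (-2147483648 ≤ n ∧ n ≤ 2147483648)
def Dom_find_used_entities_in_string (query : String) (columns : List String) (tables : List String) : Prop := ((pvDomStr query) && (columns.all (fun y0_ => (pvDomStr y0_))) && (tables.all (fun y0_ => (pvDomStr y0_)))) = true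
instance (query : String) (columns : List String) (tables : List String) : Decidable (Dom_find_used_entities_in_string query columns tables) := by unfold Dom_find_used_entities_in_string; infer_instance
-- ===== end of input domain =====

-- B replaces A's three-pass punctuation rewrite + split + token loop by ONE streaming pass over the
-- characters: a scanner that accumulates the current token and flushes it at each delimiter (alternative decomposition).
-- Both return Python sets, represented as lists of distinct elements in first-insertion order.

-- ===== PORT A =====
def find_used_entities_in_string (query : String) (columns : List String) (tables : List String) : List String × List String :=
  let nopunct_query := PySem.Str.replace (PySem.Str.replace (PySem.Str.replace query "." " ") "(" " ") ")" " "
  -- .split(' '): the separator is the nonempty literal " ", so split? never returns none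
  let tokens := (PySem.Str.split? nopunct_query " ").getD []
  tokens.foldl
    (fun (st : PySem.Set String × PySem.Set String) token =>
      let st := if columns.contains (PySem.Str.lower token) then (PySem.Set.add st.1 (PySem.Str.lower token), st.2) else st
      let st := if tables.contains (PySem.Str.lower token) then (st.1, PySem.Set.add st.2 (PySem.Str.lower token)) else st
      st)
    (PySem.Set.empty, PySem.Set.empty)

-- ===== PORT B =====
-- port of `ch in ' .()'` (membership of one char in the 4-char string)
def pvIsDelim (c : Char) : Bool := c == ' ' || c == '.' || c == '(' || c == ')'

-- port of B's `flush()` closure; `''.join(cur)` over a list of single characters is String.ofList (exact)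
def pvFlush (columns tables : List String)
    (st : List Char × PySem.Set String × PySem.Set String) :
    List Char × PySem.Set String × PySem.Set String :=
  let token := PySem.Str.lower (String.ofList st.1)
  let uc := if columns.contains token then PySem.Set.add st.2.1 token else st.2.1
  let ut := if tables.contains token then PySem.Set.add st.2.2 token else st.2.2
  ([], uc, ut)

def find_used_entities_in_string_alt (query : String) (columns : List String) (tables : List String) : List String × List String :=
  let st := query.toList.foldl
    (fun st ch => if pvIsDelim ch then pvFlush columns tables st else (st.1 ++ [ch], st.2))
    ([], PySem.Set.empty, PySem.Set.empty)
  let st := pvFlush columns tables st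
  (st.2.1, st.2.2)

-- ===== PRECONDITION & SPEC =====
def Spec_find_used_entities_in_string (query : String) (columns : List String) (tables : List String) (out : List String × List String) : Prop := out = find_used_entities_in_string_alt query columns tables
instance (query : String) (columns : List String) (tables : List String) (out : List String × List String) : Decidable (Spec_find_used_entities_in_string query columns tables out) := by unfold Spec_find_used_entities_in_string; infer_instance

-- ===== CLAIM (what is proved, stated in full; the proofs are below) =====
def Claim_equal_find_used_entities_in_string : Prop := ∀ (query : String) (columns : List String) (tables : List String), Dom_find_used_entities_in_string query columns tables → Spec_find_used_entities_in_string query columns tables (find_used_entities_in_string query columns tables)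

-- ===== LEMMAS AND PROOFS =====

-- substitution performed by one single-character replace
def pvSubst (o c : Char) : Char := if c == o then ' ' else c

-- the composite substitution performed by A's three replaces
def pvMapP (c : Char) : Char := if c == '.' || c == '(' || c == ')' then ' ' else c

-- the (head, tail) of the nonempty token list produced by splitting on delimiters
def pvTokens : List Char → List Char × List (List Char)
  | [] => ([], [])
  | c :: s =>
      let r := pvTokens s
      if pvIsDelim c then ([], r.1 :: r.2) else (c :: r.1, r.2)

-- single-character replace is a map
theorem pv_replace_go (o : Char) :
    ∀ (s acc : List Char) (fuel : Nat), s.length ≤ fuel →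
      PySem.Chars.replace.go [o] [' '] fuel s acc = acc.reverse ++ s.map (pvSubst o) := by
  intro s
  induction s with
  | nil => intro acc fuel _; cases fuel <;> simp [PySem.Chars.replace.go]
  | cons c t ih =>
      intro acc fuel hf
      cases fuel with
      | zero => simp at hf
      | succ fuel =>
          rw [PySem.Chars.replace.go]
          by_cases hc : c = o
          · subst hc
            simp only [List.isPrefixOf, BEq.rfl, Bool.true_and, if_pos]
            simp only [List.length_cons, List.length_nil, List.drop_succ_cons, List.drop_zero]
            rw [ih _ fuel (by simpa using hf)]
            simp [pvSubst]
          · have : ([o].isPrefixOf (c :: t)) = false := by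
              simp [List.isPrefixOf, Ne.symm hc]
            rw [this]
            simp only [Bool.false_eq_true, if_neg, not_false_iff]
            rw [ih _ fuel (by simpa using hf)]
            simp [pvSubst, hc]

theorem pv_replace_single (s : List Char) (o : Char) :
    PySem.Chars.replace s [o] [' '] = s.map (pvSubst o) := by
  rw [PySem.Chars.replace]
  simp only [List.isEmpty_cons, Bool.false_eq_true, if_neg, not_false_iff]
  exact pv_replace_go o s [] s.length le_rfl

-- A's three replaces combined are one map by pvMapP
theorem pv_nopunct (q : String) :
    (PySem.Str.replace (PySem.Str.replace (PySem.Str.replace q "." " ") "(" " ") ")" " ").toList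
      = q.toList.map pvMapP := by
  simp only [PySem.Str.toList_replace]
  show PySem.Chars.replace (PySem.Chars.replace (PySem.Chars.replace q.toList ['.'] [' ']) ['('] [' ']) [')'] [' '] = _
  rw [pv_replace_single, pv_replace_single, pv_replace_single, List.map_map, List.map_map]
  refine List.map_congr_left ?_
  intro c _
  simp only [Function.comp_apply, pvSubst, pvMapP]
  by_cases h1 : c = '.' <;> by_cases h2 : c = '(' <;> by_cases h3 : c = ')' <;>
    simp_all

-- splitting the mapped string on ' ' yields exactly the pvTokens decomposition
theorem pv_splitOn_go :
    ∀ (s cur : List Char) (acc : List (List Char)) (fuel : Nat), s.length ≤ fuel →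
      PySem.Chars.splitOn.go [' '] fuel (s.map pvMapP) cur acc
        = acc.reverse ++ (cur.reverse ++ (pvTokens s).1) :: (pvTokens s).2 := by
  intro s
  induction s with
  | nil => intro cur acc fuel _; cases fuel <;> simp [PySem.Chars.splitOn.go, pvTokens]
  | cons c t ih =>
      intro cur acc fuel hf
      cases fuel with
      | zero => simp at hf
      | succ fuel =>
          rw [List.map_cons, PySem.Chars.splitOn.go]
          by_cases hd : pvIsDelim c = true
          · have hsp : pvMapP c = ' ' := by
              revert hd; unfold pvIsDelim pvMapP
              by_cases h1 : c = '.' <;> by_cases h2 : c = '(' <;> by_cases h3 : c = ')' <;>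
                by_cases h4 : c = ' ' <;> simp_all
            rw [hsp]
            simp only [List.isPrefixOf, BEq.rfl, Bool.true_and, if_pos,
              List.length_cons, List.length_nil, List.drop_succ_cons, List.drop_zero]
            rw [ih [] (cur.reverse :: acc) fuel (by simpa using hf)]
            simp [pvTokens, hd]
          · have hsp : pvMapP c = c := by
              revert hd; unfold pvIsDelim pvMapP
              by_cases h1 : c = '.' <;> by_cases h2 : c = '(' <;> by_cases h3 : c = ')' <;>
                simp_all
            have hne : c ≠ ' ' := by
              intro h; exact hd (by simp [pvIsDelim, h])
            rw [hsp]
            have : ([' '].isPrefixOf (c :: t.map pvMapP)) = false := by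
              simp [List.isPrefixOf, Ne.symm hne]
            rw [this]
            simp only [Bool.false_eq_true, if_neg, not_false_iff]
            rw [ih (c :: cur) acc fuel (by simpa using hf)]
            simp [pvTokens, hd]

theorem pv_splitOn (s : List Char) :
    PySem.Chars.splitOn (s.map pvMapP) [' '] = (pvTokens s).1 :: (pvTokens s).2 := by
  rw [PySem.Chars.splitOn]
  rw [pv_splitOn_go s [] [] ((s.map pvMapP).length + 1) (by simp)]
  simp

-- A's token step in parallel-pair form, over the raw character list of the token
def pvAStep (columns tables : List String) (st : PySem.Set String × PySem.Set String)
    (t : List Char) : PySem.Set String × PySem.Set String :=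
  let token := PySem.Str.lower (String.ofList t)
  ((if columns.contains token then PySem.Set.add st.1 token else st.1),
   (if tables.contains token then PySem.Set.add st.2 token else st.2))

-- B's scan-and-flush equals A's fold over the token decomposition
theorem pv_scan_eq (columns tables : List String) :
    ∀ (s cur : List Char) (uc ut : PySem.Set String),
      (pvFlush columns tables
        (s.foldl (fun st ch => if pvIsDelim ch then pvFlush columns tables st else (st.1 ++ [ch], st.2))
          (cur, uc, ut))).2
      = List.foldl (pvAStep columns tables) (uc, ut) ((cur ++ (pvTokens s).1) :: (pvTokens s).2) := by
  intro s
  induction s with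
  | nil => intro cur uc ut; simp [pvTokens, pvFlush, pvAStep]
  | cons c t ih =>
      intro cur uc ut
      rw [List.foldl_cons]
      by_cases hd : pvIsDelim c = true
      · rw [if_pos hd]
        show (pvFlush columns tables (t.foldl _ (pvFlush columns tables (cur, uc, ut)))).2 = _
        have hfl : pvFlush columns tables (cur, uc, ut)
            = ([], (pvAStep columns tables (uc, ut) cur).1, (pvAStep columns tables (uc, ut) cur).2) := by
          simp [pvFlush, pvAStep]
        rw [hfl]
        rw [ih [] _ _]
        simp [pvTokens, hd, pvAStep]
      · rw [if_neg hd]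
        rw [ih (cur ++ [c]) uc ut]
        simp [pvTokens, hd]

-- ===== VERDICT (by name: the statement is the Claim_ definition above) =====
theorem find_used_entities_in_string_spec : Claim_equal_find_used_entities_in_string := by
  intro query columns tables _
  unfold Spec_find_used_entities_in_string find_used_entities_in_string find_used_entities_in_string_alt
  dsimp only
  -- evaluate A's split into the pvTokens decomposition
  have hsplit : (PySem.Str.split?
      (PySem.Str.replace (PySem.Str.replace (PySem.Str.replace query "." " ") "(" " ") ")" " ") " ").getD []
      = ((pvTokens query.toList).1 :: (pvTokens query.toList).2).map String.ofList := by
    rw [PySem.Str.split?]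
    show (Option.map _ (PySem.Chars.split? _ [' '])).getD [] = _
    rw [PySem.Chars.split?]
    simp only [List.isEmpty_cons, Bool.false_eq_true, if_neg, not_false_iff, Option.map_some,
      Option.getD_some]
    rw [pv_nopunct, pv_splitOn]
  rw [hsplit, List.foldl_map]
  have hstep : (fun (st : PySem.Set String × PySem.Set String) (t : List Char) =>
      let token := String.ofList t
      let st := if columns.contains (PySem.Str.lower token) then (PySem.Set.add st.1 (PySem.Str.lower token), st.2) else st
      let st := if tables.contains (PySem.Str.lower token) then (st.1, PySem.Set.add st.2 (PySem.Str.lower token)) else st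
      st) = pvAStep columns tables := by
    funext st t
    by_cases hc : PySem.Str.lower (String.ofList t) ∈ columns <;>
      by_cases ht : PySem.Str.lower (String.ofList t) ∈ tables <;>
        simp [pvAStep, hc, ht]
  rw [hstep]
  rw [pv_scan_eq columns tables query.toList [] PySem.Set.empty PySem.Set.empty]
  simp
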